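-- pv_equiv track=rewrite | github.com/pypi-data/pypi-mirror-31 | packages/ntab/ntab-0.3.1.tar.gz/ntab-0.3.1/ntab/lib/__init__.py | sort_as
-- ===== SOURCE A (Python) =====
-- def sort_as(items, order):
--     items = list(items)
--     # First generate items from `order`, as long as they appear in `items`.
--     for item in order:
--         try:
--             i = items.index(item)
--         except ValueError:
--             pass
--         else:
--             yield item
--             del items[i]
--     # Then, generate any remaining items from `items`.
--     for item in items:
--         yield item
-- ===== SOURCE B (Python) =====
-- def sort_as(items, order):
--     items = list(items)
--     # Count available occurrences once (hash map), instead of scanning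
--     # `items` with .index for every element of `order`.
--     avail = {}
--     for x in items:
--         avail[x] = avail.get(x, 0) + 1
--     consumed = {}
--     for item in order:
--         if avail.get(item, 0) > 0:
--             avail[item] -= 1
--             consumed[item] = consumed.get(item, 0) + 1
--             yield item
--     # Emit the items not consumed above, skipping the first
--     # consumed[x] occurrences of each value x.
--     for x in items:
--         if consumed.get(x, 0) > 0:
--             consumed[x] -= 1
--         else:
--             yield x
-- ===== Notes on version B (the rewrite author's own statement) =====
-- stated objective: faster
-- what changed: replaces the per-order-element linear items.index scan and in-place deletion with two hash counters (available/consumed) built once, then a single skip-pass over items for the leftovers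
import Mathlib
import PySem

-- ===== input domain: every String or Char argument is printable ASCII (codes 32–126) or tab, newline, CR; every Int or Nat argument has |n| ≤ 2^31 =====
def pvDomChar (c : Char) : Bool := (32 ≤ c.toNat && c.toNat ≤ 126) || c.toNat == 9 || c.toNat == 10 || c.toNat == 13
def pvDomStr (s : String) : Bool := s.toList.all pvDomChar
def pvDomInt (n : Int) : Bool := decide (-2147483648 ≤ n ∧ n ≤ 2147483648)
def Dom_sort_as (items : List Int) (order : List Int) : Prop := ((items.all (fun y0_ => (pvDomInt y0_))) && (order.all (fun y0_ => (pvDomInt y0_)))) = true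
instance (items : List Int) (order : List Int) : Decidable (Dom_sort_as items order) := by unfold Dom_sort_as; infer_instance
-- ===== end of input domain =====

-- B replaces A's per-order-element items.index scan + del with hash counters built once
-- plus one skip pass over items (objective: faster; equivalence is about the yielded sequence).

-- ===== PORT A =====
-- loop body of A's first 'for item in order' loop: state = (yielded so far, remaining items)
def sortAsStepA (st : List Int × List Int) (item : Int) : List Int × List Int :=
  match PySem.List.index? st.2 item with
  | none => st                                     -- ValueError: pass
  | some i => (st.1 ++ [item], st.2.eraseIdx i)    -- yield item; del items[i]  (i < length, so eraseIdx is exact)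

def sort_as (items : List Int) (order : List Int) : List Int :=
  let s := order.foldl sortAsStepA ([], items)
  s.1 ++ s.2                                       -- second loop: yield each remaining item

-- ===== PORT B =====
-- loop body of B's 'for item in order' loop: state = (yielded, avail, consumed)
def sortAsStepB (st : List Int × PySem.Dict Int Int × PySem.Dict Int Int) (item : Int) :
    List Int × PySem.Dict Int Int × PySem.Dict Int Int :=
  if st.2.1.getD item 0 > 0 then
    (st.1 ++ [item], st.2.1.insert item (st.2.1.getD item 0 - 1),
     st.2.2.insert item (st.2.2.getD item 0 + 1))
  else st

-- loop body of B's final 'for x in items' loop: state = (yielded, consumed)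
def sortAsStepC (st : List Int × PySem.Dict Int Int) (x : Int) : List Int × PySem.Dict Int Int :=
  if st.2.getD x 0 > 0 then (st.1, st.2.insert x (st.2.getD x 0 - 1))
  else (st.1 ++ [x], st.2)

def sort_as_alt (items : List Int) (order : List Int) : List Int :=
  let avail := items.foldl (fun d x => d.insert x (d.getD x 0 + 1)) PySem.Dict.empty
  let s := order.foldl sortAsStepB ([], avail, PySem.Dict.empty)
  (items.foldl sortAsStepC (s.1, s.2.2)).1

-- ===== PRECONDITION & SPEC =====
def Spec_sort_as (items : List Int) (order : List Int) (out : List Int) : Prop := out = sort_as_alt items order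
instance (items : List Int) (order : List Int) (out : List Int) : Decidable (Spec_sort_as items order out) := by unfold Spec_sort_as; infer_instance

-- ===== CLAIM (what is proved, stated in full; the proofs are below) =====
def Claim_equal_sort_as : Prop := ∀ (items : List Int) (order : List Int), Dom_sort_as items order → Spec_sort_as items order (sort_as items order)

-- ===== LEMMAS AND PROOFS =====

-- "skip the first (f x) occurrences of each value x" — functional model of B's last loop
def skipF : List Int → (Int → Int) → List Int
  | [], _ => []
  | x :: xs, f => if f x > 0 then skipF xs (Function.update f x (f x - 1)) else x :: skipF xs f

theorem skipF_of_nonpos (items : List Int) (f : Int → Int) (h : ∀ x, f x ≤ 0) :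
    skipF items f = items := by
  induction items with
  | nil => rfl
  | cons x xs ih =>
      simp only [skipF]
      rw [if_neg (by have := h x; omega), ih]

-- B's final loop computes skipF of the consumed counts
theorem foldl_stepC_eq_skipF (items : List Int) :
    ∀ (out : List Int) (c : PySem.Dict Int Int),
      (items.foldl sortAsStepC (out, c)).1 = out ++ skipF items (fun x => c.getD x 0) := by
  induction items with
  | nil => intro out c; simp [skipF]
  | cons x xs ih =>
      intro out c
      simp only [List.foldl_cons, sortAsStepC, skipF]
      by_cases h : c.getD x 0 > 0
      · rw [if_pos h, if_pos h, ih]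
        congr 2
        funext y
        rw [PySem.Dict.getD_insert]
        simp [Function.update]
      · rw [if_neg h, if_neg h, ih]
        simp

-- incrementing the skip count of a present value erases its first unskipped occurrence
theorem skipF_incr (items : List Int) : ∀ (f : Int → Int), (∀ x, 0 ≤ f x) → ∀ (o : Int),
    o ∈ skipF items f →
    skipF items (Function.update f o (f o + 1)) = (skipF items f).erase o := by
  induction items with
  | nil => intro f _ o ho; simp [skipF] at ho
  | cons x xs ih =>
      intro f hf o ho
      by_cases hx : x = o
      · subst hx
        by_cases hfx : f x > 0
        · -- head already skipped on both sides
          simp only [skipF, Function.update_self] at ho ⊢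
          rw [if_pos hfx, if_pos (by omega)] at *
          have h1 : Function.update (Function.update f x (f x + 1)) x (f x + 1 - 1)
              = Function.update f x (f x - 1 + 1) := by
            rw [Function.update_idem]; ring_nf
          rw [h1]
          have h2 : Function.update f x (f x - 1 + 1)
              = Function.update (Function.update f x (f x - 1)) x
                  ((Function.update f x (f x - 1)) x + 1) := by
            rw [Function.update_idem, Function.update_self]
          rw [h2]
          exact ih (Function.update f x (f x - 1))
            (fun y => by by_cases hy : y = x <;> simp [Function.update, hy] <;> [omega; exact hf y]) x
            ho
        · -- head not skipped: new count consumes it; erase removes it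
          have hfx0 : f x = 0 := le_antisymm (by omega) (hf x)
          simp only [skipF, Function.update_self]
          rw [if_pos (by omega), if_neg hfx]
          have : Function.update (Function.update f x (f x + 1)) x (f x + 1 - 1)
              = f := by rw [Function.update_idem]; simp
          rw [this, List.erase_cons_head]
      · -- x ≠ o
        have hgx : Function.update f o (f o + 1) x = f x := by
          simp [Function.update, hx]
        by_cases hfx : f x > 0
        · simp only [skipF] at ho ⊢
          rw [if_pos hfx] at ho
          rw [if_pos (by rw [hgx]; exact hfx), if_pos hfx]
          have hcomm : Function.update (Function.update f o (f o + 1)) x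
                (Function.update f o (f o + 1) x - 1)
              = Function.update (Function.update f x (f x - 1)) o
                ((Function.update f x (f x - 1)) o + 1) := by
            rw [hgx]
            rw [Function.update_comm hx]
            congr 1
            simp [Function.update, Ne.symm hx]
          rw [hcomm]
          exact ih (Function.update f x (f x - 1))
            (fun y => by by_cases hy : y = x <;> simp [Function.update, hy] <;> [omega; exact hf y]) o ho
        · simp only [skipF] at ho ⊢
          rw [if_neg hfx] at ho
          rw [if_neg (by rw [hgx]; exact hfx), if_neg hfx]
          have ho' : o ∈ skipF xs f := by
            rcases List.mem_cons.mp ho with h | h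
            · exact absurd h.symm hx
            · exact h
          rw [List.erase_cons_tail (by simpa using hx), ih f hf o ho']

-- A's try/except branch: a found index deletes the first occurrence
theorem eraseIdx_of_index? (xs : List Int) (v : Int) (i : Nat)
    (h : PySem.List.index? xs v = some i) : xs.eraseIdx i = xs.erase v := by
  obtain ⟨pre, suf, hxs, hlen, hnv⟩ := (PySem.List.index?_eq_some_iff _ _ _).mp h
  subst hxs; subst hlen
  rw [List.erase_append_right _ hnv, List.erase_cons_head]
  simp [List.eraseIdx_append_of_length_le (le_refl _)]

-- main loop invariant: the order-fold of A and of B stay in lockstep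
theorem main_fold (items : List Int) :
    ∀ (order out : List Int) (its : List Int)
      (avail consumed : PySem.Dict Int Int),
      (∀ x, avail.getD x 0 = (its.count x : Int)) →
      (∀ x, 0 ≤ consumed.getD x 0) →
      skipF items (fun x => consumed.getD x 0) = its →
      (order.foldl sortAsStepA (out, its)).1 ++ (order.foldl sortAsStepA (out, its)).2 =
      (order.foldl sortAsStepB (out, avail, consumed)).1 ++
        skipF items (fun x => (order.foldl sortAsStepB (out, avail, consumed)).2.2.getD x 0) := by
  intro order
  induction order with
  | nil =>
      intro out its avail consumed _ _ h3
      simpa using h3.symm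
  | cons item rest ih =>
      intro out its avail consumed h1 h2 h3
      simp only [List.foldl_cons]
      by_cases hmem : item ∈ its
      · -- A finds an index; B's avail count is positive
        obtain ⟨i, hi⟩ := Option.isSome_iff_exists.mp ((PySem.List.index?_isSome_iff its item).mpr hmem)
        have hcnt : 0 < its.count item := List.count_pos_iff.mpr hmem
        have hstepA : sortAsStepA (out, its) item = (out ++ [item], its.erase item) := by
          unfold sortAsStepA
          rw [hi]
          show (out ++ [item], its.eraseIdx i) = _
          rw [eraseIdx_of_index? its item i hi]
        have hpos : avail.getD item 0 > 0 := by rw [h1]; exact_mod_cast hcnt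
        have hstepB : sortAsStepB (out, avail, consumed) item =
            (out ++ [item], avail.insert item (avail.getD item 0 - 1),
             consumed.insert item (consumed.getD item 0 + 1)) := by
          simp [sortAsStepB, hpos]
        rw [hstepA, hstepB]
        apply ih
        · intro x
          rw [PySem.Dict.getD_insert]
          by_cases hx : x = item
          · subst hx
            rw [if_pos rfl, h1, List.count_erase_self]
            omega
          · rw [if_neg hx, h1, List.count_erase_of_ne hx]
        · intro x
          rw [PySem.Dict.getD_insert]
          by_cases hx : x = item
          · subst hx; rw [if_pos rfl]; have := h2 x; omega
          · rw [if_neg hx]; exact h2 x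
        · have hfun : (fun x => (consumed.insert item (consumed.getD item 0 + 1)).getD x 0)
              = Function.update (fun x => consumed.getD x 0) item (consumed.getD item 0 + 1) := by
            funext y
            rw [PySem.Dict.getD_insert]
            simp [Function.update]
          rw [hfun, skipF_incr items (fun x => consumed.getD x 0) h2 item (by rw [h3]; exact hmem), h3]
      · -- not present: both steps are no-ops
        have hstepA : sortAsStepA (out, its) item = (out, its) := by
          unfold sortAsStepA
          rw [(PySem.List.index?_eq_none_iff _ _).mpr hmem]
        have hz : avail.getD item 0 = 0 := by
          rw [h1, List.count_eq_zero_of_not_mem hmem]; rfl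
        have hstepB : sortAsStepB (out, avail, consumed) item = (out, avail, consumed) := by
          simp [sortAsStepB, hz]
        rw [hstepA, hstepB]
        exact ih out its avail consumed h1 h2 h3

-- ===== VERDICT (by name: the statement is the Claim_ definition above) =====
theorem sort_as_spec : Claim_equal_sort_as := by
  intro items order _
  show sort_as items order = sort_as_alt items order
  unfold sort_as sort_as_alt
  rw [foldl_stepC_eq_skipF]
  apply main_fold items order [] items
  · intro x
    rw [PySem.Dict.getD_foldl_insert_add_one]
    simp
  · intro x; simp
  · exact skipF_of_nonpos items _ (fun x => by simp)
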